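-- pv_equiv track=rewrite | github.com/Tahuubinh/mdlm_llm_search | properties/trna.py | find_stems_ptable
-- ===== SOURCE A (Python) =====
-- def find_stems_ptable(pt, min_bp=3):
--     """
--     Find stems from the pair table. Returns a list of stems with the format:
--     [(i_start, j_start, length), ...]
--     i_start: start position 5' (0-indexed)
--     j_start: start position 3' (0-indexed)
--     length: number of base pairs
--     """
--     n = pt[0]  # pt[0] contains the length
--     visited = [False] * (n + 1)
--     stems = []
--
--     for i in range(1, n + 1):
--         j = pt[i]
--         if j > i and not visited[i]:  # Only consider pairs i < j
--             # Count consecutive base pairs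
--             length = 0
--             i_curr, j_curr = i, j
--             while i_curr <= n and j_curr >= 1 and pt[i_curr] == j_curr:
--                 visited[i_curr] = True
--                 visited[j_curr] = True
--                 length += 1
--                 i_curr += 1
--                 j_curr -= 1
--
--             if length >= min_bp:
--                 stems.append((i - 1, j - 1, length))  # Convert to 0-indexed
--
--     return stems
-- ===== SOURCE B (Python) =====
-- def find_stems_ptable(pt, min_bp=3):
--     """Single flat scan: current-stem state plus a set of 3'-blocked positions;
--     no visited array, no inner while loop."""
--     n = pt[0]
--     stems = []
--     blocked = set()
--     active = None  # (start_i, start_j, last_i, last_j, length)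
--     for i in range(1, n + 1):
--         j = pt[i]
--         if active is not None and i == active[2] + 1 and j == active[3] - 1 and j >= 1:
--             blocked.add(j)
--             active = (active[0], active[1], i, j, active[4] + 1)
--         else:
--             if active is not None:
--                 if active[4] >= min_bp:
--                     stems.append((active[0] - 1, active[1] - 1, active[4]))
--                 active = None
--             if j > i and i not in blocked:
--                 blocked.add(j)
--                 active = (i, j, i, j, 1)
--     if active is not None and active[4] >= min_bp:
--         stems.append((active[0] - 1, active[1] - 1, active[4]))
--     return stems
-- ===== Notes on version B (the rewrite author's own statement) =====
-- stated objective: alternative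
-- what changed: A's visited array plus nested inner while-rescan is replaced by a single flat scan of positions 1..n that carries the current stem (start/last pair, length) and a set of 3'-blocked positions, flushing a stem when the diagonal breaks.
-- outside the precondition, e.g. on find_stems_ptable([3, 3, 2, 9], 2): A returns [(0, 2, 2)], B returns [(0, 2, 2)]
import Mathlib
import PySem

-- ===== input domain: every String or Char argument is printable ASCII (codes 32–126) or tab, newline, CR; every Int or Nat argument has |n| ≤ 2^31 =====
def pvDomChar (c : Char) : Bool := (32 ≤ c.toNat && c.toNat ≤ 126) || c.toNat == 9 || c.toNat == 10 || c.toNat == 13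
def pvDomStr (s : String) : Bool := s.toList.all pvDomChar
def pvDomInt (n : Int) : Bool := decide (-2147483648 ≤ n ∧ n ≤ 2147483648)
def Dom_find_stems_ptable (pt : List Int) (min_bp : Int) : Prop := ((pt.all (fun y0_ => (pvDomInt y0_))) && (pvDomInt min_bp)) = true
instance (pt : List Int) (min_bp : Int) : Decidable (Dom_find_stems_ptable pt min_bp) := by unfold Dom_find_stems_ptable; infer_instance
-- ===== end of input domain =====

-- B replaces A's visited array and nested while-rescan by one flat scan that carries the
-- current stem and a set of 3'-blocked positions (objective: alternative decomposition, same cost).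


-- ===== PORT A =====
-- shared helper: pt[i] for a nonnegative in-range index (Pre_ keeps every used index in range)
def pvGet (pt : List Int) (i : Int) : Int := (PySem.List.pyGet? pt i).getD 0

-- the inner while loop of A: returns (length, visited)
def aWhile (pt : List Int) (n : Int) (icurr jcurr : Int) (visited : List Bool) (length : Int) :
    Int × List Bool :=
  if h : icurr ≤ n ∧ 1 ≤ jcurr ∧ pvGet pt icurr = jcurr then
    aWhile pt n (icurr + 1) (jcurr - 1)
      ((visited.set icurr.toNat true).set jcurr.toNat true) (length + 1)
  else
    (length, visited)
termination_by (n + 1 - icurr).toNat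
decreasing_by omega

-- one iteration of A's outer for-loop; state = (visited, stems)
def aStep (pt : List Int) (n min_bp : Int) (st : List Bool × List (Int × Int × Int)) (i : Int) :
    List Bool × List (Int × Int × Int) :=
  let j := pvGet pt i
  if j > i ∧ st.1.getD i.toNat false = false then
    let r := aWhile pt n i j st.1 0
    (r.2, st.2 ++ (if min_bp ≤ r.1 then [(i - 1, j - 1, r.1)] else []))
  else st

def find_stems_ptable (pt : List Int) (min_bp : Int) : List (Int × Int × Int) :=
  let n := pvGet pt 0
  let visited : List Bool := List.replicate (n + 1).toNat false
  ((PySem.List.pyRange 1 (n + 1) 1).foldl (aStep pt n min_bp) (visited, [])).2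

-- ===== PORT B =====
-- B's state: (blocked 3' positions, active stem (start_i, start_j, last_i, last_j, length), stems)
def bFlush (min_bp : Int) (active : Option (Int × Int × Int × Int × Int))
    (stems : List (Int × Int × Int)) : List (Int × Int × Int) :=
  match active with
  | some (s, sj, _, _, len) => if min_bp ≤ len then stems ++ [(s - 1, sj - 1, len)] else stems
  | none => stems

def bStep (pt : List Int) (min_bp : Int)
    (st : PySem.Set Int × Option (Int × Int × Int × Int × Int) × List (Int × Int × Int))
    (i : Int) : PySem.Set Int × Option (Int × Int × Int × Int × Int) × List (Int × Int × Int) :=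
  let j := pvGet pt i
  match st with
  | (blocked, some (s, sj, li, lj, len), stems) =>
    if i = li + 1 ∧ j = lj - 1 ∧ 1 ≤ j then
      (PySem.Set.add blocked j, some (s, sj, i, j, len + 1), stems)
    else
      let stems' := if min_bp ≤ len then stems ++ [(s - 1, sj - 1, len)] else stems
      if j > i ∧ PySem.Set.contains blocked i = false then
        (PySem.Set.add blocked j, some (i, j, i, j, 1), stems')
      else (blocked, none, stems')
  | (blocked, none, stems) =>
    if j > i ∧ PySem.Set.contains blocked i = false then
      (PySem.Set.add blocked j, some (i, j, i, j, 1), stems)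
    else (blocked, none, stems)

def find_stems_ptable_alt (pt : List Int) (min_bp : Int) : List (Int × Int × Int) :=
  let n := pvGet pt 0
  let r := (PySem.List.pyRange 1 (n + 1) 1).foldl (bStep pt min_bp) (PySem.Set.empty, none, [])
  bFlush min_bp r.2.1 r.2.2

-- ===== PRECONDITION & SPEC =====
-- Pre_ excludes the empty list (A raises IndexError on pt[0]) and, when n = pt[0] ≥ 1, the tables
-- that are too short or carry an entry pt[i] > n for some 1 ≤ i ≤ n: there A's pt[i] / visited[j]
-- indexing raises IndexError (on the rare such inputs where the offending position was already
-- visited A still returns; B returns the same value there — see the cite in claim.json).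
def Pre_find_stems_ptable (pt : List Int) (_min_bp : Int) : Prop :=
  pt ≠ [] ∧ (pt.headI ≤ 0 ∨
    (pt.headI.toNat + 1 ≤ pt.length ∧ ∀ x ∈ pt.tail.take pt.headI.toNat, x ≤ pt.headI))
instance (pt : List Int) (min_bp : Int) : Decidable (Pre_find_stems_ptable pt min_bp) := by
  unfold Pre_find_stems_ptable; infer_instance

def pvWitness_find_stems_ptable : List Int × Int := ([5, 5, 4, 0, 2, 1], 2)

def Spec_find_stems_ptable (pt : List Int) (min_bp : Int) (out : List (Int × Int × Int)) : Prop :=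
  out = find_stems_ptable_alt pt min_bp
instance (pt : List Int) (min_bp : Int) (out : List (Int × Int × Int)) :
    Decidable (Spec_find_stems_ptable pt min_bp out) := by
  unfold Spec_find_stems_ptable; infer_instance

-- ===== CLAIM (what is proved, stated in full; the proofs are below) =====
def Claim_equal_find_stems_ptable : Prop := ∀ (pt : List Int) (min_bp : Int), Dom_find_stems_ptable pt min_bp → Pre_find_stems_ptable pt min_bp → Spec_find_stems_ptable pt min_bp (find_stems_ptable pt min_bp)

-- ===== LEMMAS AND PROOFS =====

-- A's outer fold from position i (returns the stems component); state = (visited, stems)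
def pvAF (pt : List Int) (n min_bp i : Int) (st : List Bool × List (Int × Int × Int)) :
    List (Int × Int × Int) :=
  ((PySem.List.pyRange i (n + 1) 1).foldl (aStep pt n min_bp) st).2

-- B's fold from position i followed by the final flush; state = (blocked, active, stems)
def pvBF (pt : List Int) (n min_bp i : Int)
    (st : PySem.Set Int × Option (Int × Int × Int × Int × Int) × List (Int × Int × Int)) :
    List (Int × Int × Int) :=
  let r := (PySem.List.pyRange i (n + 1) 1).foldl (bStep pt min_bp) st
  bFlush min_bp r.2.1 r.2.2

-- simulation invariant: from position i on, A's visited flags agree with B's blocked set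
def pvInv (n i : Int) (vs : List Bool) (S : PySem.Set Int) : Prop :=
  ∀ k : Int, i ≤ k → k ≤ n → vs.getD k.toNat false = PySem.Set.contains S k

theorem pv_getD_set_self (l : List Bool) (k : Nat) (h : k < l.length) (v : Bool) :
    (l.set k v).getD k false = v := by
  simp [List.getD_eq_getElem?_getD, h]

theorem pv_getD_set_ne (l : List Bool) (a k : Nat) (h : a ≠ k) (v : Bool) :
    (l.set a v).getD k false = l.getD k false := by
  simp [List.getD_eq_getElem?_getD, h]

theorem pv_set_true_mono (l : List Bool) (a k : Nat) (h : l.getD k false = true) :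
    (l.set a true).getD k false = true := by
  rw [List.getD_eq_getElem?_getD] at h ⊢
  rw [List.getElem?_set]
  split_ifs with h1 <;> simp_all

theorem pv_contains_add (S : PySem.Set Int) (x y : Int) :
    (PySem.Set.contains (PySem.Set.add S x) y = true) ↔
      (PySem.Set.contains S y = true ∨ y = x) := by
  rw [PySem.Set.contains_iff, PySem.Set.contains_iff, PySem.Set.mem_add]

theorem pv_aWhile_mono (pt : List Int) (n icurr jcurr : Int) (vs : List Bool) (len : Int)
    (k : Nat) (h : vs.getD k false = true) :
    ((aWhile pt n icurr jcurr vs len).2).getD k false = true := by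
  fun_induction aWhile with
  | case1 ic jc vs len hc ih => exact ih (pv_set_true_mono _ _ _ (pv_set_true_mono _ _ _ h))
  | case2 => exact h

-- step equations for the two fold bodies
theorem pv_aStep_start (pt : List Int) (n min_bp i : Int) (vs : List Bool)
    (stems : List (Int × Int × Int))
    (h : pvGet pt i > i ∧ vs.getD i.toNat false = false) :
    aStep pt n min_bp (vs, stems) i =
      ((aWhile pt n i (pvGet pt i) vs 0).2,
        stems ++ (if min_bp ≤ (aWhile pt n i (pvGet pt i) vs 0).1
          then [(i - 1, pvGet pt i - 1, (aWhile pt n i (pvGet pt i) vs 0).1)] else [])) := by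
  simp only [aStep]
  rw [if_pos h]

theorem pv_aStep_skip (pt : List Int) (n min_bp i : Int) (vs : List Bool)
    (stems : List (Int × Int × Int))
    (h : ¬ (pvGet pt i > i ∧ vs.getD i.toNat false = false)) :
    aStep pt n min_bp (vs, stems) i = (vs, stems) := by
  simp only [aStep]
  rw [if_neg h]

theorem pv_bStep_ext (pt : List Int) (min_bp i s sj li lj len : Int) (S : PySem.Set Int)
    (stems : List (Int × Int × Int))
    (h : i = li + 1 ∧ pvGet pt i = lj - 1 ∧ 1 ≤ pvGet pt i) :
    bStep pt min_bp (S, some (s, sj, li, lj, len), stems) i =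
      (PySem.Set.add S (pvGet pt i), some (s, sj, i, pvGet pt i, len + 1), stems) := by
  simp only [bStep]
  rw [if_pos h]

theorem pv_bStep_noext (pt : List Int) (min_bp i s sj li lj len : Int) (S : PySem.Set Int)
    (stems : List (Int × Int × Int))
    (h : ¬ (i = li + 1 ∧ pvGet pt i = lj - 1 ∧ 1 ≤ pvGet pt i)) :
    bStep pt min_bp (S, some (s, sj, li, lj, len), stems) i =
      bStep pt min_bp (S, none,
        if min_bp ≤ len then stems ++ [(s - 1, sj - 1, len)] else stems) i := by
  simp only [bStep]
  rw [if_neg h]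

theorem pv_bStep_start (pt : List Int) (min_bp i : Int) (S : PySem.Set Int)
    (stems : List (Int × Int × Int))
    (h : pvGet pt i > i ∧ PySem.Set.contains S i = false) :
    bStep pt min_bp (S, none, stems) i =
      (PySem.Set.add S (pvGet pt i), some (i, pvGet pt i, i, pvGet pt i, 1), stems) := by
  simp only [bStep]
  rw [if_pos h]

theorem pv_bStep_stay (pt : List Int) (min_bp i : Int) (S : PySem.Set Int)
    (stems : List (Int × Int × Int))
    (h : ¬ (pvGet pt i > i ∧ PySem.Set.contains S i = false)) :
    bStep pt min_bp (S, none, stems) i = (S, none, stems) := by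
  simp only [bStep]
  rw [if_neg h]

-- peeling one position off each fold
theorem pv_pvAF_cons (pt : List Int) (n min_bp i : Int)
    (st : List Bool × List (Int × Int × Int)) (hi : i ≤ n) :
    pvAF pt n min_bp i st = pvAF pt n min_bp (i + 1) (aStep pt n min_bp st i) := by
  rw [pvAF, pvAF, PySem.List.pyRange_one_cons (show i < n + 1 by omega), List.foldl_cons]

theorem pv_pvBF_cons (pt : List Int) (n min_bp i : Int)
    (st : PySem.Set Int × Option (Int × Int × Int × Int × Int) × List (Int × Int × Int))
    (hi : i ≤ n) :
    pvBF pt n min_bp i st = pvBF pt n min_bp (i + 1) (bStep pt min_bp st i) := by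
  rw [pvBF, pvBF, PySem.List.pyRange_one_cons (show i < n + 1 by omega), List.foldl_cons]

theorem pv_pvAF_nil (pt : List Int) (n min_bp i : Int)
    (st : List Bool × List (Int × Int × Int)) (hi : n + 1 ≤ i) :
    pvAF pt n min_bp i st = st.2 := by
  rw [pvAF, PySem.List.pyRange_one_eq_nil hi, List.foldl_nil]

theorem pv_pvBF_nil (pt : List Int) (n min_bp i : Int)
    (st : PySem.Set Int × Option (Int × Int × Int × Int × Int) × List (Int × Int × Int))
    (hi : n + 1 ≤ i) :
    pvBF pt n min_bp i st = bFlush min_bp st.2.1 st.2.2 := by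
  rw [pvBF, PySem.List.pyRange_one_eq_nil hi, List.foldl_nil]

-- past the end of the range both folds stop and agree
theorem pv_end (pt : List Int) (n min_bp : Int) (i : Int) (hi : n + 1 ≤ i) :
    ((∀ vs S stems, 1 ≤ i → vs.length = (n + 1).toNat → pvInv n i vs S →
        pvAF pt n min_bp i (vs, stems) = pvBF pt n min_bp i (S, none, stems))
    ∧ (∀ s sj jc len vs S stems,
        1 ≤ s → s ≤ n → 0 ≤ jc → jc + 1 ≤ sj → sj ≤ n →
        i = s + len → jc = sj - len → 1 ≤ len →
        vs.length = (n + 1).toNat → pvInv n i vs S →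
        pvAF pt n min_bp i ((aWhile pt n i jc vs len).2,
            stems ++ (if min_bp ≤ (aWhile pt n i jc vs len).1
              then [(s - 1, sj - 1, (aWhile pt n i jc vs len).1)] else []))
          = pvBF pt n min_bp i (S, some (s, sj, i - 1, jc + 1, len), stems))) := by
  constructor
  · intro vs S stems _ _ _
    rw [pv_pvAF_nil _ _ _ _ _ hi, pv_pvBF_nil _ _ _ _ _ hi]
    rfl
  · intro s sj jc len vs S stems _ _ _ _ _ _ _ _ _ _
    rw [aWhile, dif_neg (by omega)]
    rw [pv_pvAF_nil _ _ _ _ _ hi, pv_pvBF_nil _ _ _ _ _ hi]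
    show stems ++ _ = bFlush min_bp (some (s, sj, i - 1, jc + 1, len)) stems
    rw [bFlush]
    split_ifs <;> simp

-- the combined simulation: Fresh (no active stem) and W (mid-stem) statements
theorem pv_main (pt : List Int) (n min_bp : Int)
    (HP : ∀ k : Int, 1 ≤ k → k ≤ n → pvGet pt k ≤ n) :
    ∀ m : Nat, ∀ i : Int, (n + 1 - i).toNat ≤ m →
      ((∀ vs S stems, 1 ≤ i → vs.length = (n + 1).toNat → pvInv n i vs S →
          pvAF pt n min_bp i (vs, stems) = pvBF pt n min_bp i (S, none, stems))
      ∧ (∀ s sj jc len vs S stems,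
          1 ≤ s → s ≤ n → 0 ≤ jc → jc + 1 ≤ sj → sj ≤ n →
          i = s + len → jc = sj - len → 1 ≤ len →
          vs.length = (n + 1).toNat → pvInv n i vs S →
          pvAF pt n min_bp i ((aWhile pt n i jc vs len).2,
              stems ++ (if min_bp ≤ (aWhile pt n i jc vs len).1
                then [(s - 1, sj - 1, (aWhile pt n i jc vs len).1)] else []))
            = pvBF pt n min_bp i (S, some (s, sj, i - 1, jc + 1, len), stems))) := by
  intro m
  induction m with
  | zero =>
    intro i hm
    exact pv_end pt n min_bp i (by omega)
  | succ m IH =>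
    intro i hm
    by_cases hi : i ≤ n
    case neg => exact pv_end pt n min_bp i (by omega)
    case pos =>
    have hfresh : ∀ vs S stems, 1 ≤ i → vs.length = (n + 1).toNat → pvInv n i vs S →
        pvAF pt n min_bp i (vs, stems) = pvBF pt n min_bp i (S, none, stems) := by
      intro vs S stems h1 hlen hinv
      have hvi : vs.getD i.toNat false = PySem.Set.contains S i := hinv i le_rfl hi
      rw [pv_pvAF_cons _ _ _ _ _ hi, pv_pvBF_cons _ _ _ _ _ hi]
      by_cases hstart : pvGet pt i > i ∧ PySem.Set.contains S i = false
      · rw [pv_aStep_start _ _ _ _ _ _ ⟨hstart.1, by rw [hvi]; exact hstart.2⟩,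
          pv_bStep_start _ _ _ _ _ hstart]
        rw [aWhile, dif_pos ⟨hi, by omega, rfl⟩]
        have hinv2 : pvInv n (i + 1) ((vs.set i.toNat true).set (pvGet pt i).toNat true)
            (PySem.Set.add S (pvGet pt i)) := by
          intro k hk1 hk2
          have hjn : pvGet pt i ≤ n := HP i h1 hi
          by_cases hkj : k = pvGet pt i
          · rw [hkj, pv_getD_set_self _ _ (by simp [hlen]; omega)]
            exact ((pv_contains_add S (pvGet pt i) (pvGet pt i)).mpr (Or.inr rfl)).symm
          · rw [pv_getD_set_ne _ _ _ (by omega), pv_getD_set_ne _ _ _ (by omega)]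
            rw [hinv k (by omega) hk2]
            rw [Bool.eq_iff_iff, pv_contains_add]
            simp [hkj]
        have hih := (IH (i + 1) (by omega)).2 i (pvGet pt i) (pvGet pt i - 1) 1
          ((vs.set i.toNat true).set (pvGet pt i).toNat true) (PySem.Set.add S (pvGet pt i))
          stems h1 hi (by omega) (by omega) (HP i h1 hi) (by omega) (by omega) (by omega)
          (by simp [hlen]) hinv2
        rw [show (i + 1 - 1 : Int) = i by omega, show (pvGet pt i - 1 + 1 : Int) = pvGet pt i
          by omega] at hih
        rw [show ((0 : Int) + 1) = 1 by norm_num]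
        exact hih
      · rw [pv_aStep_skip _ _ _ _ _ _ (by rw [hvi]; exact hstart),
          pv_bStep_stay _ _ _ _ _ hstart]
        exact (IH (i + 1) (by omega)).1 vs S stems (by omega) hlen
          (fun k hk1 hk2 => hinv k (by omega) hk2)
    refine ⟨hfresh, ?_⟩
    intro s sj jc len vs S stems hs hsn hjc hjs hsjn hieq hjeq hl1 hlen hinv
    by_cases hc : 1 ≤ jc ∧ pvGet pt i = jc
    · -- the while continues: B extends the active stem
      rw [aWhile, dif_pos ⟨hi, hc.1, hc.2⟩]
      have hmark : ((aWhile pt n (i + 1) (jc - 1)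
          ((vs.set i.toNat true).set jc.toNat true) (len + 1)).2).getD i.toNat false = true := by
        apply pv_aWhile_mono
        apply pv_set_true_mono
        exact pv_getD_set_self _ _ (by rw [hlen]; omega) _
      rw [pv_pvAF_cons _ _ _ _ _ hi, pv_pvBF_cons _ _ _ _ _ hi]
      rw [pv_aStep_skip _ _ _ _ _ _ (by rw [hmark]; simp),
        pv_bStep_ext _ _ _ _ _ _ _ _ _ _ ⟨by omega, by omega, by omega⟩, hc.2]
      have hinv2 : pvInv n (i + 1) ((vs.set i.toNat true).set jc.toNat true)
          (PySem.Set.add S jc) := by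
        intro k hk1 hk2
        by_cases hkj : k = jc
        · rw [hkj, pv_getD_set_self _ _ (by simp [hlen]; omega)]
          exact ((pv_contains_add S jc jc).mpr (Or.inr rfl)).symm
        · rw [pv_getD_set_ne _ _ _ (by omega), pv_getD_set_ne _ _ _ (by omega)]
          rw [hinv k (by omega) hk2]
          rw [Bool.eq_iff_iff, pv_contains_add]
          simp [hkj]
      have hih := (IH (i + 1) (by omega)).2 s sj (jc - 1) (len + 1)
        ((vs.set i.toNat true).set jc.toNat true) (PySem.Set.add S jc) stems
        hs hsn (by omega) (by omega) hsjn (by omega) (by omega) (by omega)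
        (by simp [hlen]) hinv2
      rw [show (i + 1 - 1 : Int) = i by omega, show (jc - 1 + 1 : Int) = jc by omega] at hih
      exact hih
    · -- the while stops here: B flushes the active stem and falls back to the fresh case
      rw [aWhile, dif_neg (by omega)]
      have hBsplit : pvBF pt n min_bp i (S, some (s, sj, i - 1, jc + 1, len), stems)
          = pvBF pt n min_bp i (S, none,
              if min_bp ≤ len then stems ++ [(s - 1, sj - 1, len)] else stems) := by
        rw [pv_pvBF_cons _ _ _ _ _ hi, pv_pvBF_cons _ _ _ _ _ hi,
          pv_bStep_noext _ _ _ _ _ _ _ _ _ _ (by omega)]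
      rw [hBsplit]
      have hflush : (stems ++ (if min_bp ≤ ((len, vs) : Int × List Bool).1
            then [(s - 1, sj - 1, ((len, vs) : Int × List Bool).1)] else []))
          = (if min_bp ≤ len then stems ++ [(s - 1, sj - 1, len)] else stems) := by
        split_ifs <;> simp
      show pvAF pt n min_bp i (vs, stems ++ _) = _
      rw [hflush]
      exact hfresh vs S _ (by omega) hlen hinv

-- ===== VERDICT (by name: the statement is the Claim_ definition above) =====
theorem find_stems_ptable_spec : Claim_equal_find_stems_ptable := by
  intro pt min_bp hdom hpre
  unfold Spec_find_stems_ptable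
  obtain ⟨hne, hpre2⟩ := hpre
  obtain ⟨n0, rest, rfl⟩ : ∃ n0 rest, pt = n0 :: rest := by
    cases pt with
    | nil => exact absurd rfl hne
    | cons a l => exact ⟨a, l, rfl⟩
  have hget0 : pvGet (n0 :: rest) 0 = n0 := by simp [pvGet]
  by_cases hn : n0 ≤ 0
  · simp [find_stems_ptable, find_stems_ptable_alt, hget0,
      PySem.List.pyRange_one_eq_nil (show n0 + 1 ≤ 1 by omega), bFlush]
  · have hlen : n0.toNat + 1 ≤ (n0 :: rest).length := by
      rcases hpre2 with h | h
      · simp [List.headI] at h; omega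
      · simpa [List.headI] using h.1
    have hbound : ∀ x ∈ rest.take n0.toNat, x ≤ n0 := by
      rcases hpre2 with h | h
      · simp [List.headI] at h; omega
      · simpa [List.headI] using h.2
    have HP : ∀ k : Int, 1 ≤ k → k ≤ n0 → pvGet (n0 :: rest) k ≤ n0 := by
      intro k hk1 hk2
      have hkl : k.toNat < (n0 :: rest).length := by simp at hlen ⊢; omega
      have hg : pvGet (n0 :: rest) k = (n0 :: rest)[k.toNat] := by
        rw [pvGet, PySem.List.pyGet?_of_nonneg _ (by omega), List.getElem?_eq_getElem hkl]
        rfl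
      rw [hg]
      obtain ⟨t, ht⟩ : ∃ t, k.toNat = t + 1 := ⟨k.toNat - 1, by omega⟩
      have htk : t < (rest.take n0.toNat).length := by simp at hkl ⊢; omega
      have hrest : (n0 :: rest)[k.toNat] = (rest.take n0.toNat)[t] := by
        rw [List.getElem_take]
        simp [ht]
      rw [hrest]
      exact hbound _ (List.getElem_mem htk)
    have hinv0 : pvInv n0 1 (List.replicate (n0 + 1).toNat false) PySem.Set.empty := by
      intro k hk1 hk2
      rw [List.getD_replicate false (by omega)]
      rfl
    have hmain := (pv_main (n0 :: rest) n0 min_bp HP (n0 + 1 - 1).toNat 1 le_rfl).1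
      (List.replicate (n0 + 1).toNat false) PySem.Set.empty [] le_rfl (by simp) hinv0
    show find_stems_ptable (n0 :: rest) min_bp = find_stems_ptable_alt (n0 :: rest) min_bp
    rw [find_stems_ptable, find_stems_ptable_alt, hget0]
    exact hmain
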